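-- pv_equiv track=rewrite | github.com/namandeepsp/code-formatter | api/formatters/python_formatter.py | _extract_and_move_imports
-- ===== SOURCE A (Python) =====
-- def _extract_and_move_imports(code: str) -> str:
--     """Extract all imports and move them to the top."""
--     lines = code.split('\n')
--     imports = []
--     other_lines = []
--
--     for line in lines:
--         stripped = line.strip()
--         if stripped.startswith(('import ', 'from ')):
--             imports.append(stripped)
--         elif stripped or other_lines:  # Keep empty lines after first non-empty
--             other_lines.append(line)
--
--     # Remove trailing empty lines from other_lines
--     while other_lines and not other_lines[-1].strip():
--         other_lines.pop()
--
--     # Combine: imports + blank line + rest of code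
--     if imports and other_lines:
--         return '\n'.join(imports) + '\n\n' + '\n'.join(other_lines)
--     elif imports:
--         return '\n'.join(imports)
--     else:
--         return '\n'.join(other_lines)
-- ===== SOURCE B (Python) =====
-- def _is_import_line(line):
--     s = line.strip()
--     return s.startswith('import ') or s.startswith('from ')
--
--
-- def _drop_blank_prefix(lines):
--     out = list(lines)
--     while out and not out[0].strip():
--         out.pop(0)
--     return out
--
--
-- def _extract_and_move_imports(code: str) -> str:
--     """Extract all imports and move them to the top."""
--     lines = code.split('\n')
--     imports = [line.strip() for line in lines if _is_import_line(line)]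
--     rest = [line for line in lines if not _is_import_line(line)]
--     rest = _drop_blank_prefix(rest)
--     rest = _drop_blank_prefix(rest[::-1])[::-1]
--     if imports and rest:
--         return '\n'.join(imports) + '\n\n' + '\n'.join(rest)
--     if imports:
--         return '\n'.join(imports)
--     return '\n'.join(rest)
-- ===== Notes on version B (the rewrite author's own statement) =====
-- stated objective: alternative
-- what changed: Replaces A's single stateful loop (whose 'stripped or other_lines' invariant implicitly drops leading blanks) with two independent filter passes plus explicit leading/trailing blank trimming of the rest, done via one prefix-trim helper applied directly and on the reversed list.
import Mathlib
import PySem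

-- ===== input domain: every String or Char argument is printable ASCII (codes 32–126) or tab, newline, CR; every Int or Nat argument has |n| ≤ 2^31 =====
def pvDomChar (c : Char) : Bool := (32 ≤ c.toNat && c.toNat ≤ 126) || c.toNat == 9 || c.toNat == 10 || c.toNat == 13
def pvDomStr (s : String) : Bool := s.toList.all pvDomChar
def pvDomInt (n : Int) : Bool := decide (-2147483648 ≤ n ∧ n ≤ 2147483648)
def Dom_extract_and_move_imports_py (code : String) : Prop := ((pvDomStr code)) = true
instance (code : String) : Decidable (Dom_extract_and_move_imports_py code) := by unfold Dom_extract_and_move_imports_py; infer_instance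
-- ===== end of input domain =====

-- B rebuilds the result by two filter passes plus explicit blank-prefix/suffix trimming,
-- instead of A's single stateful loop; same cost, different decomposition (objective: alternative).

-- ===== PORT A =====
-- A's loop body: strip the line; import lines go (stripped) to imports, otherwise the
-- line is kept verbatim iff it is non-blank or other_lines is already non-empty.
def pvStepA (st : List String × List String) (line : String) : List String × List String :=
  let stripped := PySem.Str.strip line
  if PySem.Str.startswith stripped "import " || PySem.Str.startswith stripped "from " then
    (st.1 ++ [stripped], st.2)
  else if stripped ≠ "" ∨ st.2 ≠ [] then
    (st.1, st.2 ++ [line])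
  else st

-- A's trailing while-loop: pop the last element while it strips to empty.
def pvTrimTrail (l : List String) : List String :=
  match _h : l.getLast? with
  | some x => if PySem.Str.strip x = "" then pvTrimTrail l.dropLast else l
  | none => l
termination_by l.length
decreasing_by
  have hne : l ≠ [] := by intro he; subst he; simp at _h
  have : 0 < l.length := List.length_pos_iff.mpr hne
  simp [List.length_dropLast]; omega

def extract_and_move_imports_py (code : String) : String :=
  let lines := (PySem.Str.split? code "\n").getD []
  let p := lines.foldl pvStepA ([], [])
  let imports := p.1
  let other_lines := pvTrimTrail p.2
  if imports ≠ [] ∧ other_lines ≠ [] then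
    PySem.Str.join "\n" imports ++ "\n\n" ++ PySem.Str.join "\n" other_lines
  else if imports ≠ [] then
    PySem.Str.join "\n" imports
  else
    PySem.Str.join "\n" other_lines

-- ===== PORT B =====
def pvIsImportLine (line : String) : Bool :=
  let s := PySem.Str.strip line
  PySem.Str.startswith s "import " || PySem.Str.startswith s "from "

-- B's helper: drop elements from the front while they strip to empty.
def pvDropBlankPrefix : List String → List String
  | [] => []
  | x :: xs => if PySem.Str.strip x = "" then pvDropBlankPrefix xs else x :: xs

def extract_and_move_imports_py_alt (code : String) : String :=
  let lines := (PySem.Str.split? code "\n").getD []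
  let imports := (lines.filter pvIsImportLine).map PySem.Str.strip
  let rest0 := lines.filter (fun l => !pvIsImportLine l)
  let rest1 := pvDropBlankPrefix rest0
  let rest := (pvDropBlankPrefix rest1.reverse).reverse
  if imports ≠ [] ∧ rest ≠ [] then
    PySem.Str.join "\n" imports ++ "\n\n" ++ PySem.Str.join "\n" rest
  else if imports ≠ [] then
    PySem.Str.join "\n" imports
  else
    PySem.Str.join "\n" rest

-- ===== PRECONDITION & SPEC =====
def Spec_extract_and_move_imports_py (code : String) (out : String) : Prop := out = extract_and_move_imports_py_alt code
instance (code : String) (out : String) : Decidable (Spec_extract_and_move_imports_py code out) := by unfold Spec_extract_and_move_imports_py; infer_instance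

-- ===== CLAIM (what is proved, stated in full; the proofs are below) =====
def Claim_equal_extract_and_move_imports_py : Prop := ∀ (code : String), Dom_extract_and_move_imports_py code → Spec_extract_and_move_imports_py code (extract_and_move_imports_py code)

-- ===== LEMMAS AND PROOFS =====

theorem stepA_imp (st : List String × List String) (line : String)
    (h : pvIsImportLine line = true) :
    pvStepA st line = (st.1 ++ [PySem.Str.strip line], st.2) := by
  simp only [pvStepA]
  rw [if_pos (show (PySem.Str.startswith (PySem.Str.strip line) "import " ||
    PySem.Str.startswith (PySem.Str.strip line) "from ") = true from h)]

theorem stepA_keep (st : List String × List String) (line : String)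
    (h : pvIsImportLine line = false)
    (hc : PySem.Str.strip line ≠ "" ∨ st.2 ≠ []) :
    pvStepA st line = (st.1, st.2 ++ [line]) := by
  simp only [pvStepA]
  rw [if_neg (by
    intro hb
    rw [show (PySem.Str.startswith (PySem.Str.strip line) "import " ||
      PySem.Str.startswith (PySem.Str.strip line) "from ") = false from h] at hb
    exact Bool.false_ne_true hb), if_pos hc]

theorem stepA_skip (st : List String × List String) (line : String)
    (h : pvIsImportLine line = false)
    (hb : PySem.Str.strip line = "") (ho : st.2 = []) :
    pvStepA st line = st := by
  simp only [pvStepA]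
  rw [if_neg (by
    intro hb'
    rw [show (PySem.Str.startswith (PySem.Str.strip line) "import " ||
      PySem.Str.startswith (PySem.Str.strip line) "from ") = false from h] at hb'
    exact Bool.false_ne_true hb'),
    if_neg (by simp [hb, ho])]

-- Once other_lines is non-empty, A's loop simply appends every non-import line.
theorem foldA_nonempty (lines : List String) (imps oth : List String) (h : oth ≠ []) :
    lines.foldl pvStepA (imps, oth) =
      (imps ++ (lines.filter pvIsImportLine).map PySem.Str.strip,
       oth ++ lines.filter (fun l => !pvIsImportLine l)) := by
  induction lines generalizing imps oth with
  | nil => simp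
  | cons line rest ih =>
    rcases Bool.eq_false_or_eq_true (pvIsImportLine line) with himp | himp
    · rw [List.foldl_cons, stepA_imp _ _ himp, ih (imps ++ [PySem.Str.strip line]) oth h]
      simp [himp]
    · rw [List.foldl_cons, stepA_keep _ _ himp (Or.inr h),
        ih imps (oth ++ [line]) (by simp)]
      simp [himp]

-- From the empty other_lines state, A's loop produces the non-import lines with
-- their blank prefix dropped.
theorem foldA_empty (lines : List String) (imps : List String) :
    lines.foldl pvStepA (imps, []) =
      (imps ++ (lines.filter pvIsImportLine).map PySem.Str.strip,
       pvDropBlankPrefix (lines.filter (fun l => !pvIsImportLine l))) := by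
  induction lines generalizing imps with
  | nil => simp [pvDropBlankPrefix]
  | cons line rest ih =>
    rcases Bool.eq_false_or_eq_true (pvIsImportLine line) with himp | himp
    · rw [List.foldl_cons, stepA_imp _ _ himp, ih (imps ++ [PySem.Str.strip line])]
      simp [himp]
    · by_cases hblank : PySem.Str.strip line = ""
      · rw [List.foldl_cons, stepA_skip _ _ himp hblank rfl, ih imps]
        simp [himp, pvDropBlankPrefix, hblank]
      · rw [List.foldl_cons, stepA_keep _ _ himp (Or.inl hblank)]
        show List.foldl pvStepA (imps, [line]) rest = _
        rw [foldA_nonempty rest imps [line] (by simp)]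
        simp [himp, pvDropBlankPrefix, hblank]

-- A's trailing pop-loop equals B's reverse / drop-blank-prefix / reverse.
theorem pvTrimTrail_concat (xs : List String) (x : String) :
    pvTrimTrail (xs ++ [x]) =
      if PySem.Str.strip x = "" then pvTrimTrail xs else xs ++ [x] := by
  rw [pvTrimTrail]
  split
  · rename_i y heq
    have hy : x = y := by simpa using heq
    subst hy
    rw [List.dropLast_concat]
  · rename_i heq
    simp at heq

theorem trimTrail_eq (l : List String) :
    pvTrimTrail l = (pvDropBlankPrefix l.reverse).reverse := by
  induction l using List.reverseRecOn with
  | nil => simp [pvTrimTrail, pvDropBlankPrefix]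
  | append_singleton xs x ih =>
    rw [pvTrimTrail_concat]
    simp only [List.reverse_append, List.reverse_cons, List.reverse_nil,
      List.nil_append, List.cons_append, pvDropBlankPrefix]
    by_cases hblank : PySem.Str.strip x = ""
    · simp [hblank, ih]
    · simp [hblank]

-- ===== VERDICT (by name: the statement is the Claim_ definition above) =====
theorem extract_and_move_imports_py_spec : Claim_equal_extract_and_move_imports_py := by
  intro code _
  show extract_and_move_imports_py code = extract_and_move_imports_py_alt code
  simp only [extract_and_move_imports_py, extract_and_move_imports_py_alt,
    foldA_empty, trimTrail_eq, List.nil_append]
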